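-- pv_equiv track=rewrite | github.com/pypi-data/pypi-mirror-386 | packages/flowtask/flowtask-5.9.24-cp312-cp312-manylinux2014_x86_64.manylinux_2_17_x86_64.whl/flowtask/components/Workday/parsers/worker_parsers.py | _select_preferred_address
-- ===== SOURCE A (Python) =====
-- from typing import Any, Dict, List, Optional
-- from typing import Any, Dict
-- from typing import Any, Dict, Optional
--
-- def _select_preferred_address(addr_entries: List[Dict[str, Any]]) -> Dict[str, Any]:
--     """
--     Select the preferred address from a list of addresses.
--     Priority order:
--     1. Personal address (Defaulted_Business_Site_Address="0" or "false")
--     2. Most recent address by Effective_Date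
--     3. First address as fallback
--     """
--     if not addr_entries:
--         return {}
--
--     # Convert to list if it's a single dict
--     if isinstance(addr_entries, dict):
--         addr_entries = [addr_entries]
--
--     # Filter for personal addresses (non-business)
--     personal_addresses = []
--     business_addresses = []
--
--     for addr in addr_entries:
--         defaulted_business = addr.get("Defaulted_Business_Site_Address")
--
--         # Check if it's a personal address (Defaulted_Business_Site_Address="0" or "false")
--         is_personal = (
--             defaulted_business == "0" or
--             defaulted_business == 0 or
--             defaulted_business == "false" or
--             defaulted_business is False
--         )
--
--         if is_personal:
--             personal_addresses.append(addr)
--         else: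
--             business_addresses.append(addr)
--
--     # Priority 1: Use personal address if available
--     if personal_addresses:
--         # If multiple personal addresses, pick the most recent
--         if len(personal_addresses) > 1:
--             personal_addresses.sort(
--                 key=lambda x: x.get("Effective_Date", ""),
--                 reverse=True
--             )
--         return personal_addresses[0]
--
--     # Priority 2: If no personal address, use business address (most recent)
--     if business_addresses:
--         if len(business_addresses) > 1:
--             business_addresses.sort(
--                 key=lambda x: x.get("Effective_Date", ""),
--                 reverse=True
--             )
--         return business_addresses[0]
--
--     # Fallback: Return first address
--     return addr_entries[0]
-- ===== SOURCE B (Python) =====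
-- def _select_preferred_address(addr_entries):
--     """Pick the preferred address by a single priority-ordered max:
--     personal addresses outrank business ones, then most recent Effective_Date,
--     ties resolved to the earliest entry (Python max keeps the first maximum)."""
--     if not addr_entries:
--         return {}
--     if isinstance(addr_entries, dict):
--         addr_entries = [addr_entries]
--
--     def is_personal(addr):
--         v = addr.get("Defaulted_Business_Site_Address")
--         return v == "0" or v == 0 or v == "false" or v is False
--
--     return max(addr_entries,
--                key=lambda a: (is_personal(a), a.get("Effective_Date", "")))
-- ===== Notes on version B (the rewrite author's own statement) =====
-- stated objective: simpler
-- what changed: Replaced the partition-into-two-lists-then-conditionally-sort-each structure by a single priority-ordered selection: one max over the entries with the composite key (is_personal, effective_date), which reproduces A's category priority and its stable descending sort's first-of-the-most-recent tie-breaking.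
import Mathlib
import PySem

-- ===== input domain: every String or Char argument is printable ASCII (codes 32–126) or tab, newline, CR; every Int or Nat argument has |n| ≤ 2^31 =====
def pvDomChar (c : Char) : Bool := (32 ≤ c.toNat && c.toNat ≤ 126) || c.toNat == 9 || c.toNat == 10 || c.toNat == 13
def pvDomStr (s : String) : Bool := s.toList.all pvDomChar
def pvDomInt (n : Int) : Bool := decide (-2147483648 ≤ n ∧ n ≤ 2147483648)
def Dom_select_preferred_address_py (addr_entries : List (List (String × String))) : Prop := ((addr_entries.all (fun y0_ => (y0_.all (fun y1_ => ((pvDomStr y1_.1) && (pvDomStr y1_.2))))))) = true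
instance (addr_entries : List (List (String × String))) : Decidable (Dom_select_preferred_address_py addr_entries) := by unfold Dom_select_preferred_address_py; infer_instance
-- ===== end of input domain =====

-- B replaces A's partition-into-two-lists-then-sort by one priority-ordered max
-- over the composite key (is_personal, effective_date); objective: simpler.


-- ===== PORT A =====
-- Literal port of A. The 'isinstance(addr_entries, dict)' normalisation is a no-op
-- under the Lean types (the argument is always a list) and is omitted.
-- In 'is_personal', the arms 'defaulted_business == 0' and 'defaulted_business is False'
-- can never hold for string dict values, so only the two string tests remain.
def select_preferred_address_py (addr_entries : List (List (String × String))) : List (String × String) :=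
  if addr_entries = [] then []
  else
    let pb := addr_entries.foldl
      (fun (acc : List (List (String × String)) × List (List (String × String))) addr =>
        let defaulted_business := PySem.Dict.get? ⟨addr⟩ "Defaulted_Business_Site_Address"
        let is_personal := defaulted_business == some "0" || defaulted_business == some "false"
        if is_personal then (acc.1 ++ [addr], acc.2) else (acc.1, acc.2 ++ [addr]))
      ([], [])
    let personal_addresses := pb.1
    let business_addresses := pb.2
    if personal_addresses ≠ [] then
      (if 1 < personal_addresses.length then
         PySem.List.sorted personal_addresses (fun x => PySem.Dict.getD ⟨x⟩ "Effective_Date" "") true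
       else personal_addresses).headD []   -- personal_addresses[0]; the list is nonempty here
    else if business_addresses ≠ [] then
      (if 1 < business_addresses.length then
         PySem.List.sorted business_addresses (fun x => PySem.Dict.getD ⟨x⟩ "Effective_Date" "") true
       else business_addresses).headD []   -- business_addresses[0]; the list is nonempty here
    else
      addr_entries.headD []                -- addr_entries[0]; addr_entries ≠ [] here

-- ===== PORT B =====
def is_personal_b (addr : List (String × String)) : Bool :=
  let v := PySem.Dict.get? ⟨addr⟩ "Defaulted_Business_Site_Address"
  v == some "0" || v == some "false"

def eff_date_b (addr : List (String × String)) : String :=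
  PySem.Dict.getD ⟨addr⟩ "Effective_Date" ""

def select_preferred_address_py_alt (addr_entries : List (List (String × String))) : List (String × String) :=
  if addr_entries = [] then []
  else
    match PySem.List.max2? addr_entries is_personal_b eff_date_b with
    | some m => m
    | none => []   -- unreachable: max2? is none only on the empty list

-- ===== PRECONDITION & SPEC =====
def Spec_select_preferred_address_py (addr_entries : List (List (String × String))) (out : List (String × String)) : Prop := out = select_preferred_address_py_alt addr_entries
instance (addr_entries : List (List (String × String))) (out : List (String × String)) : Decidable (Spec_select_preferred_address_py addr_entries out) := by unfold Spec_select_preferred_address_py; infer_instance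

-- ===== CLAIM (what is proved, stated in full; the proofs are below) =====
def Claim_equal_select_preferred_address_py : Prop := ∀ (addr_entries : List (List (String × String))), Dom_select_preferred_address_py addr_entries → Spec_select_preferred_address_py addr_entries (select_preferred_address_py addr_entries)

-- ===== LEMMAS AND PROOFS =====

-- A's partition loop builds exactly the two filters of the input.
theorem partition_fold_eq_filter {α : Type} (p : α → Bool) (xs : List α)
    (a b : List α) :
    xs.foldl (fun (acc : List α × List α) x =>
        if p x then (acc.1 ++ [x], acc.2) else (acc.1, acc.2 ++ [x])) (a, b)
      = (a ++ xs.filter p, b ++ xs.filter (fun x => !p x)) := by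
  induction xs generalizing a b with
  | nil => simp
  | cons x xs ih =>
    simp only [List.foldl_cons, List.filter_cons]
    by_cases h : p x = true
    · simp [h, ih]
    · simp [h, ih]

-- max?/max2? on a list extended by one element: one more step of Python's running max.
theorem max?_append_none {α κ : Type} [LT κ] [DecidableLT κ]
    (ys : List α) (key : α → κ) (x : α) (hm : PySem.List.max? ys key = none) :
    PySem.List.max? (ys ++ [x]) key = some x := by
  unfold PySem.List.max? at hm ⊢
  rw [List.foldl_append, hm]
  rfl

theorem max?_append_some {α κ : Type} [LT κ] [DecidableLT κ]
    (ys : List α) (key : α → κ) (x m : α) (hm : PySem.List.max? ys key = some m) :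
    PySem.List.max? (ys ++ [x]) key = if key m < key x then some x else some m := by
  unfold PySem.List.max? at hm ⊢
  rw [List.foldl_append, hm]
  rfl

theorem max2?_append_none {α κ₁ κ₂ : Type} [LT κ₁] [DecidableLT κ₁] [LT κ₂] [DecidableLT κ₂]
    (ys : List α) (k1 : α → κ₁) (k2 : α → κ₂) (x : α)
    (hm : PySem.List.max2? ys k1 k2 = none) :
    PySem.List.max2? (ys ++ [x]) k1 k2 = some x := by
  unfold PySem.List.max2? at hm ⊢
  rw [List.foldl_append, hm]
  rfl

theorem max2?_append_some {α κ₁ κ₂ : Type} [LT κ₁] [DecidableLT κ₁] [LT κ₂] [DecidableLT κ₂]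
    (ys : List α) (k1 : α → κ₁) (k2 : α → κ₂) (x m : α)
    (hm : PySem.List.max2? ys k1 k2 = some m) :
    PySem.List.max2? (ys ++ [x]) k1 k2
      = if (decide (k1 m < k1 x) || !decide (k1 x < k1 m) && decide (k2 m < k2 x))
        then some x else some m := by
  unfold PySem.List.max2? at hm ⊢
  rw [List.foldl_append, hm]
  rfl

-- head of Python's stable reverse sort = Python max (first maximal element).
theorem head_sorted_rev_eq_max? {α κ : Type} [LT κ] [DecidableLT κ]
    (xs : List α) (key : α → κ) :
    (PySem.List.sorted xs key true).head? = PySem.List.max? xs key := by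
  induction xs using List.reverseRecOn with
  | nil => rfl
  | append_singleton ys x ih =>
    have hs : PySem.List.sorted (ys ++ [x]) key true
        = PySem.List.insertBy (fun a b => decide (key b < key a)) x
            (PySem.List.sorted ys key true) := by
      simp [PySem.List.sorted, List.foldl_append]
    rw [hs]
    cases hso : PySem.List.sorted ys key true with
    | nil =>
      have hn : PySem.List.max? ys key = none := by rw [← ih, hso]; rfl
      rw [max?_append_none ys key x hn]
      simp [PySem.List.insertBy]
    | cons m t =>
      have hsm : PySem.List.max? ys key = some m := by rw [← ih, hso]; rfl
      rw [max?_append_some ys key x m hsm]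
      by_cases h : key m < key x
      · simp [PySem.List.insertBy, h]
      · simp [PySem.List.insertBy, h]

-- A's per-category selection (conditional sort + first element) is max? of that category.
theorem branch_eq_max? (P : List (List (String × String)))
    (hP : P ≠ []) :
    (if 1 < P.length then PySem.List.sorted P eff_date_b true else P).headD []
      = (PySem.List.max? P eff_date_b).getD [] := by
  by_cases h : 1 < P.length
  · simp only [h, if_true]
    rw [List.headD_eq_head?_getD, head_sorted_rev_eq_max?]
  · match P, hP with
    | [m], _ => rfl
    | (a :: b :: t), _ => simp at h

-- Composite-key max over the whole list = max? of the personal category if it is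
-- nonempty, else max? of the business category.
theorem max2?_eq_filter_max? (xs : List (List (String × String))) :
    PySem.List.max2? xs is_personal_b eff_date_b
      = (if xs.filter is_personal_b ≠ [] then
           PySem.List.max? (xs.filter is_personal_b) eff_date_b
         else
           PySem.List.max? (xs.filter (fun a => !is_personal_b a)) eff_date_b) := by
  induction xs using List.reverseRecOn with
  | nil => rfl
  | append_singleton ys x ih =>
    by_cases hx : is_personal_b x = true
    · -- x is personal: the personal filter gains x and is nonempty
      have hfx : (ys ++ [x]).filter is_personal_b
          = ys.filter is_personal_b ++ [x] := by simp [List.filter_append, hx]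
      have hgx : (ys ++ [x]).filter (fun a => !is_personal_b a)
          = ys.filter (fun a => !is_personal_b a) := by simp [List.filter_append, hx]
      rw [hfx, hgx]
      by_cases hF : ys.filter is_personal_b ≠ []
      · cases hm : PySem.List.max? (ys.filter is_personal_b) eff_date_b with
        | none => exact absurd ((PySem.List.max?_eq_none_iff _ _).mp hm) hF
        | some m =>
          have hmP : is_personal_b m = true :=
            (List.mem_filter.mp (PySem.List.max?_mem hm)).2
          have h2 : PySem.List.max2? ys is_personal_b eff_date_b = some m := by
            rw [ih]; simp [hF, hm]
          rw [max2?_append_some ys _ _ x m h2,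
              max?_append_some (ys.filter is_personal_b) eff_date_b x m hm]
          by_cases hd : eff_date_b m < eff_date_b x
          · simp [hx, hmP, hd]
          · simp [hx, hmP, hd]
      · have hFe : ys.filter is_personal_b = [] := by by_contra hc; exact hF hc
        rw [hFe]
        cases hm : PySem.List.max? (ys.filter (fun a => !is_personal_b a)) eff_date_b with
        | none =>
          have h2 : PySem.List.max2? ys is_personal_b eff_date_b = none := by
            rw [ih]; simp [hFe, hm]
          rw [max2?_append_none ys _ _ x h2]
          simp [PySem.List.max?]
        | some m =>
          have hmB : is_personal_b m = false := by
            have := (List.mem_filter.mp (PySem.List.max?_mem hm)).2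
            simpa using this
          have h2 : PySem.List.max2? ys is_personal_b eff_date_b = some m := by
            rw [ih]; simp [hFe, hm]
          rw [max2?_append_some ys _ _ x m h2]
          simp [hx, hmB, PySem.List.max?]
    · -- x is business: the personal filter is unchanged
      have hx' : is_personal_b x = false := by simpa using hx
      have hfx : (ys ++ [x]).filter is_personal_b
          = ys.filter is_personal_b := by simp [List.filter_append, hx']
      have hgx : (ys ++ [x]).filter (fun a => !is_personal_b a)
          = ys.filter (fun a => !is_personal_b a) ++ [x] := by
        simp [List.filter_append, hx']
      rw [hfx, hgx]
      by_cases hF : ys.filter is_personal_b ≠ []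
      · cases hm : PySem.List.max? (ys.filter is_personal_b) eff_date_b with
        | none => exact absurd ((PySem.List.max?_eq_none_iff _ _).mp hm) hF
        | some m =>
          have hmP : is_personal_b m = true :=
            (List.mem_filter.mp (PySem.List.max?_mem hm)).2
          have h2 : PySem.List.max2? ys is_personal_b eff_date_b = some m := by
            rw [ih]; simp [hF, hm]
          rw [max2?_append_some ys _ _ x m h2]
          simp [hx', hmP, hF]
      · have hFe : ys.filter is_personal_b = [] := by by_contra hc; exact hF hc
        rw [hFe]
        cases hm : PySem.List.max? (ys.filter (fun a => !is_personal_b a)) eff_date_b with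
        | none =>
          have h2 : PySem.List.max2? ys is_personal_b eff_date_b = none := by
            rw [ih]; simp [hFe, hm]
          rw [max2?_append_none ys _ _ x h2,
              max?_append_none _ eff_date_b x hm]
          simp
        | some m =>
          have hmB : is_personal_b m = false := by
            have := (List.mem_filter.mp (PySem.List.max?_mem hm)).2
            simpa using this
          have h2 : PySem.List.max2? ys is_personal_b eff_date_b = some m := by
            rw [ih]; simp [hFe, hm]
          rw [max2?_append_some ys _ _ x m h2,
              max?_append_some _ eff_date_b x m hm]
          by_cases hd : eff_date_b m < eff_date_b x
          · simp [hx', hmB, hd]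
          · simp [hx', hmB, hd]

-- ===== VERDICT (by name: the statement is the Claim_ definition above) =====
theorem select_preferred_address_py_spec : Claim_equal_select_preferred_address_py := by
  intro xs _
  unfold Spec_select_preferred_address_py
  unfold select_preferred_address_py select_preferred_address_py_alt
  by_cases hnil : xs = []
  · simp [hnil]
  · simp only [hnil, if_false]
    have hpart := partition_fold_eq_filter is_personal_b xs [] []
    have hcond : (fun (acc : List (List (String × String)) × List (List (String × String))) addr =>
        let defaulted_business := PySem.Dict.get? (⟨addr⟩ : PySem.Dict String String) "Defaulted_Business_Site_Address"
        let is_personal := defaulted_business == some "0" || defaulted_business == some "false"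
        if is_personal then (acc.1 ++ [addr], acc.2) else (acc.1, acc.2 ++ [addr]))
        = (fun (acc : List (List (String × String)) × List (List (String × String))) x =>
            if is_personal_b x then (acc.1 ++ [x], acc.2) else (acc.1, acc.2 ++ [x])) := rfl
    rw [hcond, hpart]
    simp only [List.nil_append]
    rw [max2?_eq_filter_max?]
    by_cases hP : xs.filter is_personal_b ≠ []
    · cases hm : PySem.List.max? (xs.filter is_personal_b) eff_date_b with
      | none => exact absurd ((PySem.List.max?_eq_none_iff _ _).mp hm) hP
      | some m =>
        have := branch_eq_max? (xs.filter is_personal_b) hP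
        simp [hP, hm] at this ⊢
        exact this
    · have hPe : xs.filter is_personal_b = [] := by by_contra hc; exact hP hc
      have hB : xs.filter (fun a => !is_personal_b a) ≠ [] := by
        intro hBe
        match xs, hnil with
        | x :: t, _ =>
          by_cases h : is_personal_b x = true
          · have : x ∈ List.filter is_personal_b (x :: t) := by
              simp [List.mem_filter, h]
            rw [hPe] at this; simp at this
          · have : x ∈ List.filter (fun a => !is_personal_b a) (x :: t) := by
              simp [List.mem_filter, h]
            rw [hBe] at this; simp at this
      cases hm : PySem.List.max? (xs.filter (fun a => !is_personal_b a)) eff_date_b with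
      | none => exact absurd ((PySem.List.max?_eq_none_iff _ _).mp hm) hB
      | some m =>
        have := branch_eq_max? (xs.filter (fun a => !is_personal_b a)) hB
        simp [hPe, hB, hm] at this ⊢
        exact this
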